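-- pv_equiv track=rewrite | github.com/Banana96/id3_dec_tree | id3.py | remove_orphans
-- ===== SOURCE A (Python) =====
-- def remove_orphans(tree):
-- 	ac = set()
--
-- 	def mark(index):
-- 		if index in tree.keys():
-- 			ac.add(index)
-- 			if tree[index][1] == 0:
-- 				mark(2 * index + 1)
-- 				mark(2 * index + 2)
--
-- 	mark(0)
-- 	rem = list(set(tree.keys()).difference(ac))
--
-- 	for r in rem:
-- 		del tree[r]
--
-- 	return tree
-- ===== SOURCE B (Python) =====
-- def remove_orphans(tree):
-- 	reachable = set()
-- 	stack = [0]
-- 	while stack: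
-- 		node = stack.pop()
-- 		if node in tree and node not in reachable:
-- 			reachable.add(node)
-- 			if tree[node][1] == 0:
-- 				stack.append(2 * node + 1)
-- 				stack.append(2 * node + 2)
-- 	for k in [k for k in tree if k not in reachable]:
-- 		del tree[k]
-- 	return tree
-- ===== Notes on version B (the rewrite author's own statement) =====
-- stated objective: alternative
-- what changed: The recursive mark() closure is replaced by an iterative worklist: an explicit stack seeded with the root index plus a visited set drives the traversal, and unreachable keys are then deleted in one pass.
import Mathlib
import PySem

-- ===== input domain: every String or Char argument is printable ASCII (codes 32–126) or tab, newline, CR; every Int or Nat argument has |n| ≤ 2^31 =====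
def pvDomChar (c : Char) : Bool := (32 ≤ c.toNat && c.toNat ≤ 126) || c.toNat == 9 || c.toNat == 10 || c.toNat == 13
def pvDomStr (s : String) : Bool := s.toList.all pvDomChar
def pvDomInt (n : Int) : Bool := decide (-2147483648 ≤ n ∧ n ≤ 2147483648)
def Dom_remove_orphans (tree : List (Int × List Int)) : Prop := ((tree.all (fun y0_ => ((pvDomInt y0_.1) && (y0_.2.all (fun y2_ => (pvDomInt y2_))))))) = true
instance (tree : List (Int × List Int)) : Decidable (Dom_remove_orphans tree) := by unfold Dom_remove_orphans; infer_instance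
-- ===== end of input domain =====

-- B replaces A's recursive `mark` closure with an iterative stack worklist + visited set (alternative
-- decomposition, same cost); both mutate the input dict in place in Python — the equivalence proved
-- here is about the returned dict (which is that same object).

-- ===== PORT A =====
-- keys of the dict (assoc list in insertion order)
def pvKeys (tree : List (Int × List Int)) : List Int := tree.map Prod.fst

-- tree[node][1] == 0: first-match dict lookup, then value[1], compared with 0
-- (False when node is absent; in both programs it is only consulted after the membership test)
def pvFlag (tree : List (Int × List Int)) (node : Int) : Bool :=
  match tree.find? (fun p => p.1 == node) with
  | some p => PySem.List.pyGet? p.2 1 == some 0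
  | none => false

-- A's recursive `mark`, accumulator = the mutated set `ac`; fuel is only a totality guard
-- (tree.length + 1 bounds the recursion depth: chains of marked indices are strictly increasing).
def pvMarkA (tree : List (Int × List Int)) : Nat → Int → PySem.Set Int → PySem.Set Int
  | 0, _, ac => ac
  | fuel + 1, index, ac =>
    if (pvKeys tree).contains index then
      if pvFlag tree index then
        pvMarkA tree fuel (2 * index + 2)
          (pvMarkA tree fuel (2 * index + 1) (PySem.Set.add ac index))
      else PySem.Set.add ac index
    else ac

def remove_orphans (tree : List (Int × List Int)) : List (Int × List Int) :=
  -- rem = set(tree.keys()).difference(ac); one `del` per key of rem (order-independent)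
  (PySem.Set.diff (PySem.Set.ofList (pvKeys tree))
      (pvMarkA tree (tree.length + 1) 0 PySem.Set.empty)).foldl
    (fun t r => t.eraseP (fun p => p.1 == r)) tree

-- ===== PORT B =====
-- B's while-loop: stack with head = top (pop = head; append x then append y = y :: x :: ·);
-- fuel is only a totality guard (the loop makes at most 3 * tree.length + 1 iterations).
def pvLoopB (tree : List (Int × List Int)) : Nat → List Int → PySem.Set Int → PySem.Set Int
  | 0, _, r => r
  | _ + 1, [], r => r
  | fuel + 1, node :: rest, r =>
    if (pvKeys tree).contains node && !(r.contains node) then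
      pvLoopB tree fuel
        (if pvFlag tree node then (2 * node + 2) :: (2 * node + 1) :: rest else rest)
        (PySem.Set.add r node)
    else
      pvLoopB tree fuel rest r

def remove_orphans_alt (tree : List (Int × List Int)) : List (Int × List Int) :=
  -- delete every key not in `reachable` = keep exactly the reachable entries, in order
  tree.filter (fun p => (pvLoopB tree (3 * tree.length + 1) [0] PySem.Set.empty).contains p.1)

-- ===== PRECONDITION & SPEC =====
-- pvReach tree n i x: index x is reached from index i in exactly n steps of A's traversal
-- (each step goes from a present key whose value's element 1 equals 0 to one of its two children);
-- used only to state the crash set in Pre_ below.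
def pvReach (tree : List (Int × List Int)) : Nat → Int → Int → Bool
  | 0, i, x => x == i
  | n + 1, i, x =>
    (pvKeys tree).contains i && pvFlag tree i &&
      (pvReach tree n (2 * i + 1) x || pvReach tree n (2 * i + 2) x)

-- Pre_ excludes exactly (a) duplicate keys, which cannot arise from a Python dict (A's argument is
-- a dict), and (b) trees in which some key visited by A's traversal — i.e. reachable from the root
-- index — has a value list with fewer than two elements: there A raises IndexError on
-- tree[index][1] and returns nothing (reachable visited keys need at most tree.length steps, since
-- indices strictly increase along a chain).
def Pre_remove_orphans (tree : List (Int × List Int)) : Prop :=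
  (tree.map Prod.fst).Nodup ∧
    ∀ p ∈ tree, (∃ n ≤ tree.length, pvReach tree n 0 p.1 = true) → 2 ≤ p.2.length
instance (tree : List (Int × List Int)) : Decidable (Pre_remove_orphans tree) := by
  unfold Pre_remove_orphans; infer_instance

def pvWitness_remove_orphans : (List (Int × List Int)) := [(0, [5, 0]), (1, [3, 1]), (2, [4, 1])]

def Spec_remove_orphans (tree : List (Int × List Int)) (out : List (Int × List Int)) : Prop := out = remove_orphans_alt tree
instance (tree : List (Int × List Int)) (out : List (Int × List Int)) : Decidable (Spec_remove_orphans tree out) := by unfold Spec_remove_orphans; infer_instance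

-- ===== CLAIM (what is proved, stated in full; the proofs are below) =====
def Claim_equal_remove_orphans : Prop := ∀ (tree : List (Int × List Int)), Dom_remove_orphans tree → Pre_remove_orphans tree → Spec_remove_orphans tree (remove_orphans tree)

-- ===== LEMMAS AND PROOFS =====

-- reachability from index i in n steps, mirroring the gating of both traversals
def pvRn (tree : List (Int × List Int)) : Nat → Int → Int → Prop
  | 0, i, x => x = i
  | n + 1, i, x =>
    (pvKeys tree).contains i = true ∧ pvFlag tree i = true ∧
      (pvRn tree n (2 * i + 1) x ∨ pvRn tree n (2 * i + 2) x)

-- A: the accumulator is contained in the result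
theorem pvMarkA_sub (tree : List (Int × List Int)) (f : Nat) (i : Int) (ac : PySem.Set Int)
    (x : Int) (hx : x ∈ ac) : x ∈ pvMarkA tree f i ac := by
  induction f generalizing i ac with
  | zero => simpa [pvMarkA] using hx
  | succ f ih =>
    simp only [pvMarkA]
    split
    · split
      · exact ih _ _ (ih _ _ ((PySem.Set.mem_add _ _ _).2 (Or.inl hx)))
      · exact (PySem.Set.mem_add _ _ _).2 (Or.inl hx)
    · exact hx

-- A: soundness
theorem pvMarkA_sound (tree : List (Int × List Int)) (f : Nat) (i : Int) (ac : PySem.Set Int)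
    (x : Int) (hx : x ∈ pvMarkA tree f i ac) :
    x ∈ ac ∨ (x ∈ pvKeys tree ∧ ∃ n, pvRn tree n i x) := by
  induction f generalizing i ac with
  | zero => exact Or.inl (by simpa [pvMarkA] using hx)
  | succ f ih =>
    simp only [pvMarkA] at hx
    by_cases hc : (pvKeys tree).contains i = true
    · rw [if_pos hc] at hx
      have hmemadd : x ∈ PySem.Set.add ac i →
          x ∈ ac ∨ (x ∈ pvKeys tree ∧ ∃ n, pvRn tree n i x) := by
        intro h'
        rcases (PySem.Set.mem_add _ _ _).1 h' with h' | h'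
        · exact Or.inl h'
        · exact Or.inr ⟨h' ▸ List.contains_iff_mem.1 hc, 0, h'⟩
      by_cases hflag : pvFlag tree i = true
      · rw [if_pos hflag] at hx
        rcases ih _ _ hx with hx2 | ⟨hk, n, hn⟩
        · rcases ih _ _ hx2 with hx3 | ⟨hk, n, hn⟩
          · exact hmemadd hx3
          · exact Or.inr ⟨hk, n + 1, hc, hflag, Or.inl hn⟩
        · exact Or.inr ⟨hk, n + 1, hc, hflag, Or.inr hn⟩
      · rw [if_neg hflag] at hx; exact hmemadd hx
    · rw [if_neg hc] at hx; exact Or.inl hx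

-- A: completeness, with any fuel of at least n + 1
theorem pvMarkA_compl (tree : List (Int × List Int)) (n : Nat) (i x : Int)
    (h : pvRn tree n i x) (hk : x ∈ pvKeys tree) :
    ∀ (f : Nat), n + 1 ≤ f → ∀ (ac : PySem.Set Int), x ∈ pvMarkA tree f i ac := by
  induction n generalizing i with
  | zero =>
    intro f hf ac
    obtain ⟨f', rfl⟩ : ∃ f', f = f' + 1 := ⟨f - 1, by omega⟩
    have hxi : x = i := h
    have hc : (pvKeys tree).contains i = true := List.contains_iff_mem.2 (hxi ▸ hk)
    have hmem : x ∈ PySem.Set.add ac i := (PySem.Set.mem_add _ _ _).2 (Or.inr hxi)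
    simp only [pvMarkA, if_pos hc]
    split
    · exact pvMarkA_sub _ _ _ _ _ (pvMarkA_sub _ _ _ _ _ hmem)
    · exact hmem
  | succ n ih =>
    intro f hf ac
    obtain ⟨f', rfl⟩ : ∃ f', f = f' + 1 := ⟨f - 1, by omega⟩
    obtain ⟨hc, hflag, hch⟩ := h
    simp only [pvMarkA, if_pos hc, if_pos hflag]
    rcases hch with hch | hch
    · exact pvMarkA_sub _ _ _ _ _ (ih _ hch _ (by omega) _)
    · exact ih _ hch _ (by omega) _

-- reachability chains are strictly increasing lists of keys
theorem pvRn_chain (tree : List (Int × List Int)) (n : Nat) (i x : Int)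
    (h : pvRn tree n i x) (hi : 0 ≤ i) (hk : x ∈ pvKeys tree) :
    ∃ l : List Int, l.length = n + 1 ∧ l.Pairwise (· < ·) ∧ ∀ y ∈ l, y ∈ pvKeys tree ∧ i ≤ y := by
  induction n generalizing i with
  | zero =>
    have hx : x = i := h
    refine ⟨[x], rfl, by simp, fun y hy => ?_⟩
    have hyx : y = x := by simpa using hy
    exact ⟨hyx ▸ hk, by omega⟩
  | succ n ih =>
    obtain ⟨hc, hflag, hch⟩ := h
    have hkey : i ∈ pvKeys tree := List.contains_iff_mem.1 hc
    have step : ∀ c, (c = 2 * i + 1 ∨ c = 2 * i + 2) → pvRn tree n c x →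
        ∃ l : List Int, l.length = n + 1 + 1 ∧ l.Pairwise (· < ·) ∧
          ∀ y ∈ l, y ∈ pvKeys tree ∧ i ≤ y := by
      intro c hcdef hrc
      have hic : i < c := by omega
      obtain ⟨l, hlen, hpw, hmem⟩ := ih c hrc (by omega)
      refine ⟨i :: l, by simp [hlen], List.pairwise_cons.2 ⟨?_, hpw⟩, ?_⟩
      · intro y hy; exact lt_of_lt_of_le hic (hmem y hy).2
      · intro y hy
        rcases List.mem_cons.1 hy with rfl | hy
        · exact ⟨hkey, le_refl _⟩
        · exact ⟨(hmem y hy).1, le_of_lt (lt_of_lt_of_le hic (hmem y hy).2)⟩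
    rcases hch with hch | hch
    · exact step _ (Or.inl rfl) hch
    · exact step _ (Or.inr rfl) hch

theorem pvRn_bound (tree : List (Int × List Int)) (n : Nat) (x : Int)
    (h : pvRn tree n 0 x) (hk : x ∈ pvKeys tree) : n + 1 ≤ tree.length := by
  obtain ⟨l, hlen, hpw, hmem⟩ := pvRn_chain tree n 0 x h le_rfl hk
  have hnd : l.Nodup := hpw.imp (fun hlt => ne_of_lt hlt)
  have hsub : l ⊆ pvKeys tree := fun y hy => (hmem y hy).1
  have := (List.subperm_of_subset hnd hsub).length_le
  simpa [hlen, pvKeys] using this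

theorem pvMarkA_char (tree : List (Int × List Int)) (x : Int) :
    x ∈ pvMarkA tree (tree.length + 1) 0 PySem.Set.empty ↔
      x ∈ pvKeys tree ∧ ∃ n, pvRn tree n 0 x := by
  constructor
  · intro hx
    rcases pvMarkA_sound tree _ _ _ _ hx with hx | hx
    · simp [PySem.Set.empty] at hx
    · exact hx
  · rintro ⟨hk, n, hn⟩
    exact pvMarkA_compl tree n 0 x hn hk _ (by have := pvRn_bound tree n x hn hk; omega) _

-- B: soundness
theorem pvLoopB_sound (tree : List (Int × List Int)) (f : Nat) (s : List Int) (r : PySem.Set Int)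
    (x : Int) (hx : x ∈ pvLoopB tree f s r) :
    x ∈ r ∨ (x ∈ pvKeys tree ∧ ∃ i ∈ s, ∃ n, pvRn tree n i x) := by
  induction f generalizing s r with
  | zero => exact Or.inl (by simpa [pvLoopB] using hx)
  | succ f ih =>
    cases s with
    | nil => exact Or.inl (by simpa [pvLoopB] using hx)
    | cons node rest =>
      simp only [pvLoopB] at hx
      by_cases hcond : ((pvKeys tree).contains node && !(r.contains node)) = true
      · rw [if_pos hcond] at hx
        have hcond' := hcond
        simp only [Bool.and_eq_true] at hcond'
        have hcn : (pvKeys tree).contains node = true := hcond'.1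
        rcases ih _ _ hx with hx | ⟨hk, i, hi, n, hn⟩
        · rcases (PySem.Set.mem_add _ _ _).1 hx with hx | rfl
          · exact Or.inl hx
          · exact Or.inr ⟨List.contains_iff_mem.1 hcn, x, List.mem_cons_self, 0, rfl⟩
        · by_cases hflag : pvFlag tree node = true
          · rw [if_pos hflag] at hi
            rcases List.mem_cons.1 hi with rfl | hi
            · exact Or.inr ⟨hk, node, List.mem_cons_self, n + 1, hcn, hflag, Or.inr hn⟩
            · rcases List.mem_cons.1 hi with rfl | hi
              · exact Or.inr ⟨hk, node, List.mem_cons_self, n + 1, hcn, hflag, Or.inl hn⟩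
              · exact Or.inr ⟨hk, i, List.mem_cons_of_mem _ hi, n, hn⟩
          · rw [if_neg hflag] at hi
            exact Or.inr ⟨hk, i, List.mem_cons_of_mem _ hi, n, hn⟩
      · rw [if_neg hcond] at hx
        rcases ih _ _ hx with hx | ⟨hk, i, hi, n, hn⟩
        · exact Or.inl hx
        · exact Or.inr ⟨hk, i, List.mem_cons_of_mem _ hi, n, hn⟩

-- the invariant of B's loop: every visited key's relevant children are visited or on the stack
def pvInv (tree : List (Int × List Int)) (s : List Int) (r : PySem.Set Int) : Prop :=
  ∀ j ∈ r, j ∈ pvKeys tree ∧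
    (pvFlag tree j = true → ∀ c, (c = 2 * j + 1 ∨ c = 2 * j + 2) → c ∈ pvKeys tree →
      (c ∈ r ∨ c ∈ s))

-- with an empty stack the visited set is closed under reachability
theorem pvInv_closed (tree : List (Int × List Int)) (r : PySem.Set Int)
    (hinv : pvInv tree [] r) (n : Nat) (i x : Int) (hi : i ∈ r) (h : pvRn tree n i x)
    (hk : x ∈ pvKeys tree) : x ∈ r := by
  induction n generalizing i with
  | zero => exact h ▸ hi
  | succ n ih =>
    obtain ⟨hc, hflag, hch⟩ := h
    have hchild : ∀ c, (c = 2 * i + 1 ∨ c = 2 * i + 2) → pvRn tree n c x → x ∈ r := by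
      intro c hcdef hrc
      have hck : c ∈ pvKeys tree := by
        cases n with
        | zero => exact hrc ▸ hk
        | succ m => exact List.contains_iff_mem.1 hrc.1
      rcases (hinv i hi).2 hflag c hcdef hck with hcr | hcr
      · exact ih _ hcr hrc
      · simp at hcr
    rcases hch with hch | hch
    · exact hchild _ (Or.inl rfl) hch
    · exact hchild _ (Or.inr rfl) hch

-- loop measure: |stack| + 3 * (number of unvisited keys)
def pvMu (tree : List (Int × List Int)) (s : List Int) (r : PySem.Set Int) : Nat :=
  s.length + 3 * ((pvKeys tree).toFinset.filter (fun k => k ∉ r)).card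

-- visiting a fresh key decrements the unvisited-key count by exactly one
theorem pvCard_add (tree : List (Int × List Int)) (r : PySem.Set Int) (node : Int)
    (hk : node ∈ pvKeys tree) (hn : node ∉ r) :
    ((pvKeys tree).toFinset.filter (fun k => k ∉ PySem.Set.add r node)).card + 1
      = ((pvKeys tree).toFinset.filter (fun k => k ∉ r)).card := by
  have hset : (pvKeys tree).toFinset.filter (fun k => k ∉ PySem.Set.add r node)
      = ((pvKeys tree).toFinset.filter (fun k => k ∉ r)).erase node := by
    ext k
    simp only [Finset.mem_filter, Finset.mem_erase, PySem.Set.mem_add]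
    tauto
  have hmem : node ∈ (pvKeys tree).toFinset.filter (fun k => k ∉ r) := by
    simp [Finset.mem_filter, List.mem_toFinset, hk, hn]
  rw [hset, Finset.card_erase_of_mem hmem]
  have : 0 < ((pvKeys tree).toFinset.filter (fun k => k ∉ r)).card :=
    Finset.card_pos.2 ⟨node, hmem⟩
  omega

-- B: completeness, given enough fuel
theorem pvLoopB_compl (tree : List (Int × List Int)) (f : Nat) :
    ∀ (s : List Int) (r : PySem.Set Int), pvInv tree s r → pvMu tree s r ≤ f →
      ∀ (i : Int), (i ∈ s ∨ i ∈ r) → ∀ (n : Nat) (x : Int), pvRn tree n i x →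
        x ∈ pvKeys tree → x ∈ pvLoopB tree f s r := by
  induction f using Nat.strong_induction_on with
  | _ f ihf =>
  intro s r hinv hmu i hi n x hr hk
  cases s with
  | nil =>
    have hloop : pvLoopB tree f [] r = r := by cases f <;> simp [pvLoopB]
    rw [hloop]
    rcases hi with hi | hi
    · simp at hi
    · exact pvInv_closed tree r hinv n i x hi hr hk
  | cons node rest =>
    have hf1 : 1 ≤ f := le_trans (by simp only [pvMu, List.length_cons]; omega) hmu
    obtain ⟨f', rfl⟩ : ∃ f', f = f' + 1 := ⟨f - 1, by omega⟩
    simp only [pvLoopB]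
    by_cases hcond : ((pvKeys tree).contains node && !(r.contains node)) = true
    · rw [if_pos hcond]
      have hcond' := hcond
      simp only [Bool.and_eq_true, Bool.not_eq_eq_eq_not, Bool.not_true] at hcond'
      have hcn : node ∈ pvKeys tree := List.contains_iff_mem.1 hcond'.1
      have hrn : node ∉ r := by
        intro hm
        have h2 : r.contains node = true := List.contains_iff_mem.2 hm
        rw [hcond'.2] at h2
        exact Bool.false_ne_true h2
      have hcard := pvCard_add tree r node hcn hrn
      have hsub1 : ∀ c ∈ rest, c ∈ (if pvFlag tree node then
          (2 * node + 2) :: (2 * node + 1) :: rest else rest) := by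
        intro c hc; split
        · exact List.mem_cons_of_mem _ (List.mem_cons_of_mem _ hc)
        · exact hc
      have hinv1 : pvInv tree (if pvFlag tree node then
          (2 * node + 2) :: (2 * node + 1) :: rest else rest) (PySem.Set.add r node) := by
        intro j hj
        rcases (PySem.Set.mem_add _ _ _).1 hj with hj | rfl
        · obtain ⟨hjk, hjc⟩ := hinv j hj
          refine ⟨hjk, fun hfl c hcdef hck => ?_⟩
          rcases hjc hfl c hcdef hck with hcr | hcs
          · exact Or.inl ((PySem.Set.mem_add _ _ _).2 (Or.inl hcr))
          · rcases List.mem_cons.1 hcs with rfl | hcs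
            · exact Or.inl ((PySem.Set.mem_add _ _ _).2 (Or.inr rfl))
            · exact Or.inr (hsub1 _ hcs)
        · refine ⟨hcn, fun hfl c hcdef _ => Or.inr ?_⟩
          rw [if_pos hfl]
          rcases hcdef with rfl | rfl
          · exact List.mem_cons_of_mem _ List.mem_cons_self
          · exact List.mem_cons_self
      have hmu1 : pvMu tree (if pvFlag tree node then
          (2 * node + 2) :: (2 * node + 1) :: rest else rest) (PySem.Set.add r node) ≤ f' := by
        simp only [pvMu, List.length_cons] at hmu ⊢
        split
        · simp only [List.length_cons]
          omega
        · omega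
      have hi1 : i ∈ (if pvFlag tree node then
          (2 * node + 2) :: (2 * node + 1) :: rest else rest) ∨ i ∈ PySem.Set.add r node := by
        rcases hi with hi | hi
        · rcases List.mem_cons.1 hi with rfl | hi
          · exact Or.inr ((PySem.Set.mem_add _ _ _).2 (Or.inr rfl))
          · exact Or.inl (hsub1 _ hi)
        · exact Or.inr ((PySem.Set.mem_add _ _ _).2 (Or.inl hi))
      exact ihf f' (by omega) _ _ hinv1 hmu1 i hi1 n x hr hk
    · rw [if_neg hcond]
      have hcases : (pvKeys tree).contains node = false ∨ node ∈ r := by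
        cases hA : (pvKeys tree).contains node with
        | false => exact Or.inl rfl
        | true =>
          cases hB : r.contains node with
          | false =>
            exfalso
            apply hcond
            rw [hA, hB]
            rfl
          | true => exact Or.inr (List.contains_iff_mem.1 hB)
      have hnotkey : (pvKeys tree).contains node = false → node ∉ pvKeys tree := by
        intro hA hm
        rw [List.contains_iff_mem.2 hm] at hA
        exact Bool.noConfusion hA
      have hinv1 : pvInv tree rest r := by
        intro j hj
        obtain ⟨hjk, hjc⟩ := hinv j hj
        refine ⟨hjk, fun hfl c hcdef hck => ?_⟩
        rcases hjc hfl c hcdef hck with hcr | hcs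
        · exact Or.inl hcr
        · rcases List.mem_cons.1 hcs with rfl | hcs
          · rcases hcases with hno | hyes
            · exact absurd hck (hnotkey hno)
            · exact Or.inl hyes
          · exact Or.inr hcs
      have hmu1 : pvMu tree rest r ≤ f' := by
        simp only [pvMu, List.length_cons] at hmu ⊢; omega
      have hi1 : i ∈ rest ∨ i ∈ r := by
        rcases hi with hi | hi
        · rcases List.mem_cons.1 hi with rfl | hi
          · rcases hcases with hno | hyes
            · exfalso
              cases n with
              | zero =>
                have hx : x = i := hr
                exact hnotkey hno (hx ▸ hk)
              | succ m =>
                have hcm : (pvKeys tree).contains i = true := hr.1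
                rw [hno] at hcm
                exact Bool.false_ne_true hcm
            · exact Or.inr hyes
          · exact Or.inl hi
        · exact Or.inr hi
      exact ihf f' (by omega) _ _ hinv1 hmu1 i hi1 n x hr hk

theorem pvLoopB_char (tree : List (Int × List Int)) (x : Int) :
    x ∈ pvLoopB tree (3 * tree.length + 1) [0] PySem.Set.empty ↔
      x ∈ pvKeys tree ∧ ∃ n, pvRn tree n 0 x := by
  constructor
  · intro hx
    rcases pvLoopB_sound tree _ _ _ _ hx with hx | ⟨hk, i, hi, n, hn⟩
    · simp [PySem.Set.empty] at hx
    · rcases List.mem_cons.1 hi with rfl | hi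
      · exact ⟨hk, n, hn⟩
      · simp at hi
  · rintro ⟨hk, n, hn⟩
    refine pvLoopB_compl tree _ _ _ (by intro j hj; simp [PySem.Set.empty] at hj) ?_
      0 (Or.inl List.mem_cons_self) n x hn hk
    have hcard : ((pvKeys tree).toFinset.filter (fun k => k ∉ PySem.Set.empty)).card
        ≤ tree.length := by
      calc ((pvKeys tree).toFinset.filter (fun k => k ∉ PySem.Set.empty)).card
          ≤ (pvKeys tree).toFinset.card := Finset.card_filter_le _ _
        _ ≤ (pvKeys tree).length := List.toFinset_card_le _
        _ = tree.length := by simp [pvKeys]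
    simp only [pvMu, List.length_cons, List.length_nil]
    omega

-- deleting one key from a dup-free assoc list = filtering it out
theorem pvEraseP_eq_filter (t : List (Int × List Int)) (hnd : (t.map Prod.fst).Nodup) (r : Int) :
    t.eraseP (fun p => p.1 == r) = t.filter (fun p => !(p.1 == r)) := by
  induction t with
  | nil => rfl
  | cons p t ih =>
    simp only [List.map_cons, List.nodup_cons] at hnd
    by_cases hp : (p.1 == r) = true
    · have hpr : p.1 = r := by simpa using hp
      have hrest : t.filter (fun q => !(q.1 == r)) = t := by
        refine List.filter_eq_self.2 (fun q hq => ?_)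
        have : q.1 ≠ r := fun h => hnd.1 (hpr ▸ h ▸ List.mem_map.2 ⟨q, hq, rfl⟩)
        simp [this]
      simp [hp, hrest]
    · simp only [List.eraseP_cons, List.filter_cons, hp]
      simp only [Bool.not_false, if_true, cond_false]
      exact congrArg _ (ih hnd.2)

-- folding deletions over a list of keys = one filter
theorem pvFoldl_eraseP (rem : List Int) (t : List (Int × List Int))
    (hnd : (t.map Prod.fst).Nodup) :
    rem.foldl (fun t r => t.eraseP (fun p => p.1 == r)) t
      = t.filter (fun p => !(rem.contains p.1)) := by
  induction rem generalizing t with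
  | nil => simp
  | cons r rem ih =>
    simp only [List.foldl_cons]
    rw [pvEraseP_eq_filter t hnd r]
    have hnd2 : ((t.filter (fun p => !(p.1 == r))).map Prod.fst).Nodup :=
      ((List.filter_sublist (l := t)).map Prod.fst).nodup hnd
    rw [ih _ hnd2, List.filter_filter]
    refine List.filter_congr (fun p _ => ?_)
    simp only [List.contains_cons, Bool.not_or]
    rw [Bool.and_comm]

-- ===== VERDICT (by name: the statement is the Claim_ definition above) =====
theorem remove_orphans_spec : Claim_equal_remove_orphans := by
  intro tree _ hpre
  unfold Spec_remove_orphans remove_orphans remove_orphans_alt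
  rw [pvFoldl_eraseP _ tree hpre.1]
  refine List.filter_congr (fun p hp => ?_)
  have hpk : p.1 ∈ pvKeys tree := List.mem_map.2 ⟨p, hp, rfl⟩
  have hiff : p.1 ∈ PySem.Set.diff (PySem.Set.ofList (pvKeys tree))
      (pvMarkA tree (tree.length + 1) 0 PySem.Set.empty)
      ↔ ¬ (p.1 ∈ pvLoopB tree (3 * tree.length + 1) [0] PySem.Set.empty) := by
    rw [PySem.Set.mem_diff, PySem.Set.mem_ofList, pvMarkA_char, pvLoopB_char]
    simp [hpk]
  cases hdiff : (PySem.Set.diff (PySem.Set.ofList (pvKeys tree))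
      (pvMarkA tree (tree.length + 1) 0 PySem.Set.empty)).contains p.1 <;>
    cases hloop : (pvLoopB tree (3 * tree.length + 1) [0] PySem.Set.empty).contains p.1 <;>
      simp_all
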